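-- pv_equiv track=rewrite | github.com/dheerajthodupunoori/problem-solving | find_word_from_string.py | find_embedded_word
-- ===== SOURCE A (Python) =====
-- def find_embedded_word(words_, data):
--     for word in words_:
--         hashed = get_hash_map_data(data)
--         is_found = True
--         for char in word:
--             if char not in hashed or hashed[char] == 0:
--                 is_found = False
--                 break
--             elif char in hashed:
--                 hashed[char] -= 1
--
--         if is_found:
--             return word
--     return None
--
-- def get_hash_map_data(data):
--     data_hashed = {}
--     for char in data:
--         if char not in data_hashed:
--             data_hashed[char] = 1
--         else:
--             data_hashed[char] += 1
--     return data_hashed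
-- ===== SOURCE B (Python) =====
-- def find_embedded_word(words_, data):
--     # Sort-then-merge: word's chars fit in data's multiset  iff
--     # sorted(word) is a subsequence of sorted(data) (greedy linear merge).
--     def is_subseq(xs, ys):
--         i = 0
--         for y in ys:
--             if i < len(xs) and xs[i] == y:
--                 i += 1
--         return i == len(xs)
--     sorted_data = sorted(data)
--     for word in words_:
--         if is_subseq(sorted(word), sorted_data):
--             return word
--     return None
-- ===== Notes on version B (the rewrite author's own statement) =====
-- stated objective: alternative
-- what changed: Replaces the per-word frequency map with streaming decrements by a sort-then-merge algorithm: data is sorted once, each word is sorted, and multiset inclusion is decided by a greedy recursive subsequence test on the two sorted lists; no count map is built or mutated.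
import Mathlib
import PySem

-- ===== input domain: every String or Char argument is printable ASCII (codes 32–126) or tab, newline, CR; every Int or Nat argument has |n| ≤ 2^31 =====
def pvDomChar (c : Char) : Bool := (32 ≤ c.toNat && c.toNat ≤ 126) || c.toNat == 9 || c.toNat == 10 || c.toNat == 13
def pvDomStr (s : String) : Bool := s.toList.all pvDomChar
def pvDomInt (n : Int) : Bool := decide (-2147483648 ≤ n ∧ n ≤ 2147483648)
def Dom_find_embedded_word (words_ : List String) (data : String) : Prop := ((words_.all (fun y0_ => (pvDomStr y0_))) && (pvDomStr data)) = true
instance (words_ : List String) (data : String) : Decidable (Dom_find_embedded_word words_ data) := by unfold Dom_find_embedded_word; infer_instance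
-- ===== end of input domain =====

-- B replaces A's per-word rebuilt count map with streaming decrements by a
-- sort-then-merge algorithm: sorted(word) subsequence of sorted(data) (objective: alternative).

-- ===== PORT A =====
-- helper get_hash_map_data: count occurrences of each char of data
def get_hash_map_data (data : String) : PySem.Dict Char Int :=
  data.toList.foldl
    (fun d c => if !(d.contains c) then d.insert c 1 else d.insert c (d.getD c 0 + 1))
    PySem.Dict.empty

-- inner 'for char in word' loop with its early break; returns is_found
def pvCharLoop (chars : List Char) (hashed : PySem.Dict Char Int) : Bool :=
  match chars with
  | [] => true
  | c :: rest =>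
    if !(hashed.contains c) || hashed.getD c 0 == 0 then false
    else pvCharLoop rest (hashed.insert c (hashed.getD c 0 - 1))

def find_embedded_word (words_ : List String) (data : String) : Option String :=
  match words_ with
  | [] => none
  | word :: rest =>
    let hashed := get_hash_map_data data
    if pvCharLoop word.toList hashed then some word
    else find_embedded_word rest data

-- ===== PORT B =====
-- body of is_subseq's 'for y in ys' loop: advance i when xs[i] matches y
def pvSubStep (xs : List Char) (i : Nat) (y : Char) : Nat :=
  if h : i < xs.length then (if xs[i] == y then i + 1 else i) else i

-- is_subseq(xs, ys): greedy linear merge, i = chars of xs matched so far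
def pvIsSubseq (xs ys : List Char) : Bool :=
  ys.foldl (pvSubStep xs) 0 == xs.length

def find_embedded_word_alt (words_ : List String) (data : String) : Option String :=
  let sorted_data := PySem.List.sorted data.toList (fun c => c) false
  words_.find? (fun word => pvIsSubseq (PySem.List.sorted word.toList (fun c => c) false) sorted_data)

-- ===== PRECONDITION & SPEC =====
def Spec_find_embedded_word (words_ : List String) (data : String) (out : Option String) : Prop := out = find_embedded_word_alt words_ data
instance (words_ : List String) (data : String) (out : Option String) : Decidable (Spec_find_embedded_word words_ data out) := by unfold Spec_find_embedded_word; infer_instance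

-- ===== CLAIM (what is proved, stated in full; the proofs are below) =====
def Claim_equal_find_embedded_word : Prop := ∀ (words_ : List String) (data : String), Dom_find_embedded_word words_ data → Spec_find_embedded_word words_ data (find_embedded_word words_ data)

-- ===== LEMMAS AND PROOFS =====

theorem pv_getD_of_not_contains (h : PySem.Dict Char Int) (c : Char) (hc : ¬ h.contains c = true) : h.getD c 0 = 0 := by
  have hiso := PySem.Dict.contains_eq_isSome_get? (d := h) (k := c)
  cases hg : h.get? c with
  | none => simp [PySem.Dict.getD, hg]
  | some v => exact absurd (by rw [hiso, hg]; rfl) hc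

theorem pv_hash_step (d : PySem.Dict Char Int) (ch c : Char) :
    (if !(d.contains ch) then d.insert ch 1 else d.insert ch (d.getD ch 0 + 1)).getD c 0
      = if c = ch then d.getD c 0 + 1 else d.getD c 0 := by
  by_cases hc : d.contains ch = true <;> rcases eq_or_ne c ch with h | h <;>
    simp [hc, h, PySem.Dict.getD_insert]
  rw [pv_getD_of_not_contains d ch hc]

theorem pv_hash_foldl (l : List Char) (d : PySem.Dict Char Int) (c : Char) :
    (l.foldl (fun d c => if !(d.contains c) then d.insert c 1 else d.insert c (d.getD c 0 + 1)) d).getD c 0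
      = d.getD c 0 + l.count c := by
  induction l generalizing d with
  | nil => simp
  | cons ch rest ih =>
    simp only [List.foldl_cons, ih, pv_hash_step, List.count_cons]
    rcases eq_or_ne c ch with h | h
    · subst h; simp; omega
    · simp [h, Ne.symm h]

theorem pv_get_hash_map_data (data : String) (c : Char) :
    (get_hash_map_data data).getD c 0 = data.toList.count c := by
  have := pv_hash_foldl data.toList PySem.Dict.empty c
  simpa [get_hash_map_data] using this

-- characterisation of A's inner loop: multiset inclusion
theorem pvCharLoop_iff (chars : List Char) (h : PySem.Dict Char Int)
    (hnn : ∀ c, 0 ≤ h.getD c 0) :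
    pvCharLoop chars h = true ↔ ∀ c, (chars.count c : Int) ≤ h.getD c 0 := by
  induction chars generalizing h with
  | nil =>
    simp [pvCharLoop]
    intro c; exact_mod_cast hnn c
  | cons c rest ih =>
    have hcond : (!(h.contains c) || h.getD c 0 == 0) = (h.getD c 0 == 0) := by
      by_cases hc : h.contains c = true
      · simp [hc]
      · simp [hc, pv_getD_of_not_contains h c hc]
    by_cases hav : h.getD c 0 = 0
    · rw [show pvCharLoop (c :: rest) h = false from by
        simp only [pvCharLoop, hcond]; simp [hav]]
      constructor
      · intro h'; cases h'
      · intro hall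
        have := hall c
        simp only [List.count_cons_self, hav] at this
        push_cast at this
        omega
    · have hnn' : ∀ x, 0 ≤ (h.insert c (h.getD c 0 - 1)).getD x 0 := by
        intro x
        rw [PySem.Dict.getD_insert]
        split
        · have := hnn c; omega
        · exact hnn x
      rw [show pvCharLoop (c :: rest) h = pvCharLoop rest (h.insert c (h.getD c 0 - 1)) from by
        simp only [pvCharLoop, hcond]; simp [hav]]
      rw [ih _ hnn']
      constructor
      · intro hall x
        have := hall x
        rw [PySem.Dict.getD_insert] at this
        rcases eq_or_ne x c with hx | hx
        · subst hx
          simp only at this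
          simp only [List.count_cons_self]
          push_cast at this ⊢
          omega
        · simp only [if_neg hx] at this
          simpa [List.count_cons, Ne.symm hx] using this
      · intro hall x
        have := hall x
        rw [PySem.Dict.getD_insert]
        rcases eq_or_ne x c with hx | hx
        · subst hx
          simp only [List.count_cons_self] at this
          push_cast at this ⊢
          omega
        · simp only [if_neg hx]
          simpa [List.count_cons, Ne.symm hx] using this

-- recursive reference form of the greedy matcher (proof helper only)
def pvSubseqRec : List Char → List Char → Bool
  | [], _ => true
  | _ :: _, [] => false
  | x :: xs, y :: ys => if x == y then pvSubseqRec xs ys else pvSubseqRec (x :: xs) ys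

-- B's fold with matched-count i computes the recursive matcher on the suffix xs.drop i
theorem pvSubseq_fold_drop (xs ys : List Char) (i : Nat) (hi : i ≤ xs.length) :
    (ys.foldl (pvSubStep xs) i == xs.length) = pvSubseqRec (xs.drop i) ys := by
  induction ys generalizing i with
  | nil =>
    rcases lt_or_eq_of_le hi with hlt | heq
    · obtain ⟨c, rest, hdrop⟩ : ∃ c rest, xs.drop i = c :: rest := by
        cases hd : xs.drop i with
        | nil => exact absurd (List.drop_eq_nil_iff.1 hd) (by omega)
        | cons c rest => exact ⟨c, rest, rfl⟩
      simp [hdrop, pvSubseqRec, Nat.ne_of_lt hlt]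
    · simp [heq, List.drop_length, pvSubseqRec]
  | cons y ys ih =>
    simp only [List.foldl_cons]
    by_cases h : i < xs.length
    · have hdrop : xs.drop i = xs[i] :: xs.drop (i + 1) :=
        List.drop_eq_getElem_cons h
      by_cases heq : xs[i] = y
      · rw [show pvSubStep xs i y = i + 1 from by simp [pvSubStep, h, heq]]
        rw [ih (i + 1) (by omega), hdrop]
        simp [pvSubseqRec, heq]
      · rw [show pvSubStep xs i y = i from by simp [pvSubStep, h, heq]]
        conv_rhs => rw [hdrop]
        simp only [pvSubseqRec, beq_iff_eq, if_neg heq]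
        rw [← hdrop]
        exact ih i hi
    · have hieq : i = xs.length := by omega
      subst hieq
      rw [show pvSubStep xs xs.length y = xs.length from by simp [pvSubStep]]
      rw [ih xs.length le_rfl, List.drop_length]
      simp [pvSubseqRec]

-- B's greedy matcher is Mathlib's isSublist
theorem pvIsSubseq_eq_isSublist (xs ys : List Char) : pvIsSubseq xs ys = xs.isSublist ys := by
  have hrec : ∀ xs ys : List Char, pvSubseqRec xs ys = xs.isSublist ys := by
    intro xs ys
    induction ys generalizing xs with
    | nil => cases xs <;> rfl
    | cons y ys ih =>
      cases xs with
      | nil => rfl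
      | cons x xs =>
        simp only [pvSubseqRec, List.isSublist]
        split <;> [exact ih xs; exact ih (x :: xs)]
  rw [← hrec]
  unfold pvIsSubseq
  simpa using pvSubseq_fold_drop xs ys 0 (Nat.zero_le _)

-- on sorted lists, subsequence = multiset inclusion
theorem pvIsSubseq_sorted_iff (xs ys : List Char)
    (hx : xs.Pairwise (· ≤ ·)) (hy : ys.Pairwise (· ≤ ·)) :
    pvIsSubseq xs ys = true ↔ ∀ c, xs.count c ≤ ys.count c := by
  rw [pvIsSubseq_eq_isSublist, List.isSublist_iff_sublist]
  constructor
  · intro h c; exact h.count_le c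
  · intro h
    have hsp : List.Subperm xs ys := List.subperm_ext_iff.2 (fun a _ => h a)
    exact List.sublist_of_subperm_of_pairwise hsp hx hy

-- B's per-word test equals the multiset-inclusion condition
theorem pvFitsB_iff (data word : String) :
    pvIsSubseq (PySem.List.sorted word.toList (fun c => c) false)
        (PySem.List.sorted data.toList (fun c => c) false) = true
      ↔ ∀ c, word.toList.count c ≤ data.toList.count c := by
  rw [pvIsSubseq_sorted_iff _ _ (PySem.List.sorted_pairwise _ _) (PySem.List.sorted_pairwise _ _)]
  constructor <;> intro h c <;>
    simpa [(PySem.List.sorted_perm word.toList (fun c => c) false).count_eq,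
      (PySem.List.sorted_perm data.toList (fun c => c) false).count_eq] using h c

-- A's per-word test equals B's per-word test
theorem pvLoop_eq_fits (data word : String) :
    pvCharLoop word.toList (get_hash_map_data data)
      = pvIsSubseq (PySem.List.sorted word.toList (fun c => c) false)
          (PySem.List.sorted data.toList (fun c => c) false) := by
  have hnn : ∀ c, 0 ≤ (get_hash_map_data data).getD c 0 := by
    intro c; rw [pv_get_hash_map_data]; positivity
  rw [Bool.eq_iff_iff, pvCharLoop_iff _ _ hnn, pvFitsB_iff]
  constructor
  · intro h c
    have := h c
    rw [pv_get_hash_map_data] at this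
    exact_mod_cast this
  · intro h c
    rw [pv_get_hash_map_data]
    exact_mod_cast h c

theorem pv_find_eq (words_ : List String) (data : String) :
    find_embedded_word words_ data = find_embedded_word_alt words_ data := by
  induction words_ with
  | nil => rfl
  | cons w rest ih =>
    simp only [find_embedded_word, find_embedded_word_alt, List.find?_cons, pvLoop_eq_fits]
    cases h : pvIsSubseq (PySem.List.sorted w.toList (fun c => c) false)
        (PySem.List.sorted data.toList (fun c => c) false) with
    | true => simp
    | false => simpa [find_embedded_word_alt] using ih

-- ===== VERDICT (by name: the statement is the Claim_ definition above) =====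
theorem find_embedded_word_spec : Claim_equal_find_embedded_word := by
  intro words_ data _
  unfold Spec_find_embedded_word
  exact pv_find_eq words_ data
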